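-- pv_equiv track=rewrite | github.com/pypi-data/pypi-mirror-81 | packages/MetaPathways/MetaPathways-3.1.6.tar.gz/MetaPathways-3.1.6/metapathways/utils/metapathways_utils.py | split_fasta_on_sample_ids_to_dict
-- ===== SOURCE A (Python) =====
-- def split_fasta_on_sample_ids(seqs):
--     """yields (sample_id, seq_id, seq) for each entry in seqs
--
--     seqs: (seq_id,seq) pairs, as generated by MinimalFastaParser
--
--     """
--     for seq_id, seq in seqs:
--         yield (seq_id.split()[0].rsplit("_", 1)[0], seq_id, seq)
--     return
--
-- def split_fasta_on_sample_ids_to_dict(seqs):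
--     """return split_fasta_on_sample_ids as {sample_id: [(seq_id, seq), ], }
--
--     seqs: (seq_id,seq) pairs, as generated by MinimalFastaParser
--
--     """
--     result = {}
--     for sample_id, seq_id, seq in split_fasta_on_sample_ids(seqs):
--         try:
--             result[sample_id].append((seq_id, seq))
--         except KeyError:
--             result[sample_id] = [(seq_id, seq)]
--     return result
-- ===== SOURCE B (Python) =====
-- def split_fasta_on_sample_ids_to_dict(seqs):
--     """return split_fasta_on_sample_ids as {sample_id: [(seq_id, seq), ], }
--
--     Alternative decomposition: materialise all (sample_id, seq_id, seq) triples,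
--     dedup the sample ids in first-occurrence order, then build each group by a
--     per-key filtering pass.
--     """
--     triples = [(seq_id.split()[0].rsplit("_", 1)[0], seq_id, seq) for seq_id, seq in seqs]
--     keys = list(dict.fromkeys(k for k, _, _ in triples))
--     return {k: [(seq_id, seq) for kk, seq_id, seq in triples if kk == k] for k in keys}
-- ===== Notes on version B (the rewrite author's own statement) =====
-- stated objective: alternative
-- what changed: Replaces A's single streaming pass that appends into a growing dict by a three-stage pipeline: materialise all (sample_id, seq_id, seq) triples, dedup the sample ids in first-occurrence order, then build each group with a per-key filtering pass.
-- outside the precondition, e.g. on split_fasta_on_sample_ids_to_dict([('  ', 'ACGT')]): A raises IndexError, B raises IndexError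
import Mathlib
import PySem

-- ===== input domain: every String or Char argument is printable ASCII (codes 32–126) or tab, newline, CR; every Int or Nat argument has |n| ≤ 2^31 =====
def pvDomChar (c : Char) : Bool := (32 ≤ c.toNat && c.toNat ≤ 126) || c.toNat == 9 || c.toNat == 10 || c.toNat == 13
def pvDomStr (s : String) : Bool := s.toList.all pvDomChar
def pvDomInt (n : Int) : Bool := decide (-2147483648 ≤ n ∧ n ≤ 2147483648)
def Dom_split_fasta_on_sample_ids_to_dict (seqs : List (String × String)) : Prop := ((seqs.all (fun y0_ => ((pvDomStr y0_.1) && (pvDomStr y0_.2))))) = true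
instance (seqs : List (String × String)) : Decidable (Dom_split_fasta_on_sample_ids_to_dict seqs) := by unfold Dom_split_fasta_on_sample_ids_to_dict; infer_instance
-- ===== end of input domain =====

-- B replaces A's single streaming dict-append pass by: materialise all (sample_id, seq_id, seq)
-- triples, dedup the sample ids in first-occurrence order, then build each group by a per-key
-- filtering pass (objective: alternative decomposition; not claimed faster).

-- ===== PORT A =====
-- seq_id.split()[0].rsplit("_", 1)[0], shared key expression of both Pythons.
-- rsplit("_", 1)[0] has no PySem primitive; ported by hand via rfind: it is exactly the text
-- before the LAST '_' when '_' occurs, and the whole word otherwise (exact).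
-- split()[0] raises IndexError on a whitespace-only seq_id; Pre_ excludes that, headD "" is junk there.
def pvSampleId (sid : String) : String :=
  let w := (PySem.Str.split₀ sid).headD ""
  let i := PySem.Str.rfind w "_"
  if i = -1 then w else PySem.Str.slice w none (some i)

-- the generator split_fasta_on_sample_ids: (sample_id, seq_id, seq) triples
def pvTriples (seqs : List (String × String)) : List (String × String × String) :=
  seqs.map (fun p => (pvSampleId p.1, p.1, p.2))

def split_fasta_on_sample_ids_to_dict (seqs : List (String × String)) : List (String × List (String × String)) :=
  -- result = {}; for sample_id, seq_id, seq in …: try append / except KeyError: singleton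
  ((pvTriples seqs).foldl
    (fun (d : PySem.Dict String (List (String × String))) t => d.modify t.1 [] (· ++ [(t.2.1, t.2.2)]))
    PySem.Dict.empty).items

-- ===== PORT B =====
def split_fasta_on_sample_ids_to_dict_alt (seqs : List (String × String)) : List (String × List (String × String)) :=
  let triples := seqs.map (fun p => (pvSampleId p.1, p.1, p.2))
  let keys := PySem.List.dedup (triples.map (fun t => t.1))
  keys.map (fun k => (k, (triples.filter (fun t => t.1 == k)).map (fun t => (t.2.1, t.2.2))))

-- ===== PRECONDITION & SPEC =====
-- Pre_ excludes exactly the inputs where a seq_id is empty or whitespace-only: there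
-- seq_id.split()[0] raises IndexError in A (and in B alike).
def Pre_split_fasta_on_sample_ids_to_dict (seqs : List (String × String)) : Prop :=
  ∀ p ∈ seqs, PySem.Str.split₀ p.1 ≠ []
instance (seqs : List (String × String)) : Decidable (Pre_split_fasta_on_sample_ids_to_dict seqs) := by unfold Pre_split_fasta_on_sample_ids_to_dict; infer_instance

def pvWitness_split_fasta_on_sample_ids_to_dict : (List (String × String)) :=
  [("s1_a x", "ACGT"), ("s1_b", "GG"), ("s2_c", "T"), ("s1_a x", "")]

def Spec_split_fasta_on_sample_ids_to_dict (seqs : List (String × String)) (out : List (String × List (String × String))) : Prop := out = split_fasta_on_sample_ids_to_dict_alt seqs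
instance (seqs : List (String × String)) (out : List (String × List (String × String))) : Decidable (Spec_split_fasta_on_sample_ids_to_dict seqs out) := by unfold Spec_split_fasta_on_sample_ids_to_dict; infer_instance

-- ===== CLAIM (what is proved, stated in full; the proofs are below) =====
def Claim_equal_split_fasta_on_sample_ids_to_dict : Prop := ∀ (seqs : List (String × String)), Dom_split_fasta_on_sample_ids_to_dict seqs → Pre_split_fasta_on_sample_ids_to_dict seqs → Spec_split_fasta_on_sample_ids_to_dict seqs (split_fasta_on_sample_ids_to_dict seqs)

-- ===== LEMMAS AND PROOFS =====

-- A's grouping fold, characterised entry-wise via the PySem grouping lemmas.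
theorem pv_items_eq (l : List (String × String × String)) :
    ((l.foldl (fun (d : PySem.Dict String (List (String × String))) t =>
        d.modify t.1 [] (· ++ [(t.2.1, t.2.2)])) PySem.Dict.empty).items)
    = (PySem.List.dedup (l.map (fun t => t.1))).map
        (fun k => (k, (l.filter (fun t => t.1 == k)).map (fun t => (t.2.1, t.2.2)))) := by
  have hfold : l.foldl (fun (d : PySem.Dict String (List (String × String))) t =>
        d.modify t.1 [] (· ++ [(t.2.1, t.2.2)])) PySem.Dict.empty
      = (l.map (fun t => (t.1, (t.2.1, t.2.2)))).foldl
          (fun (d : PySem.Dict String (List (String × String))) q => d.modify q.1 [] (· ++ [q.2]))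
          PySem.Dict.empty := by
    rw [List.foldl_map]
  rw [hfold]
  set m := l.map (fun t => (t.1, (t.2.1, t.2.2))) with hm
  have hnd : ((m.foldl (fun (d : PySem.Dict String (List (String × String))) q =>
      d.modify q.1 [] (· ++ [q.2])) PySem.Dict.empty).keys).Nodup := by
    exact PySem.Dict.nodup_keys_foldl_modify_key m (fun q => q.1) []
      (fun d q => fun v => v ++ [q.2]) PySem.Dict.empty PySem.Dict.nodup_keys_empty
  rw [PySem.Dict.items_eq_map_keys _ hnd []]
  have hkeys : (m.foldl (fun (d : PySem.Dict String (List (String × String))) q =>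
      d.modify q.1 [] (· ++ [q.2])) PySem.Dict.empty).keys
      = PySem.Set.update (PySem.Dict.empty : PySem.Dict String (List (String × String))).keys (m.map (fun q => q.1)) := by
    exact PySem.Dict.keys_foldl_modify_key m (fun q => q.1) [] (fun d q => fun v => v ++ [q.2]) _
  rw [hkeys]
  have hkeys2 : PySem.Set.update (PySem.Dict.empty : PySem.Dict String (List (String × String))).keys (m.map (fun q => q.1))
      = PySem.List.dedup (l.map (fun t => t.1)) := by
    simp [PySem.Dict.keys_empty, PySem.Set.update, PySem.List.dedup_eq_ofList, PySem.Set.ofList_eq_foldl, hm]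
  rw [hkeys2]
  apply List.map_congr_left
  intro k hk
  have hg := PySem.Dict.getD_foldl_modify_append (l := m)
      (d := (PySem.Dict.empty : PySem.Dict String (List (String × String)))) (c := k)
  rw [hg, PySem.Dict.getD_empty]
  simp [hm]

theorem split_fasta_spec_aux (seqs : List (String × String)) :
    split_fasta_on_sample_ids_to_dict seqs = split_fasta_on_sample_ids_to_dict_alt seqs := by
  unfold split_fasta_on_sample_ids_to_dict split_fasta_on_sample_ids_to_dict_alt pvTriples
  rw [pv_items_eq]

-- ===== VERDICT (by name: the statement is the Claim_ definition above) =====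
theorem split_fasta_on_sample_ids_to_dict_spec : Claim_equal_split_fasta_on_sample_ids_to_dict := by
  intro seqs _ _
  unfold Spec_split_fasta_on_sample_ids_to_dict
  exact split_fasta_spec_aux seqs
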